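-- pv_equiv track=rewrite | github.com/ryanwsmith/yearup_challenge_2 | yearup_challenge2.py | get_weekday_metrics_for_by_cve
-- ===== SOURCE A (Python) =====
-- def get_weekday_metrics_for_by_cve(tweet_data_list):
--     weekday_metrics = {}
--
--     # Note: well need to make a nested dictionary like this:
--     #  weekday_metrics[cve][weekday]
--     # or
--     #  { "cve1": {"weekday1: 13, "weekday2": 24...} ,
--     #    "cve2": {"weekday1: 54, "weekday2": 12...} ... }
--
--     for tweet_data in tweet_data_list:
--         cve = tweet_data['cve']
--         weekday = tweet_data['date_weekday']
--
--         # Check to see if we've already added this cve before, otherwise we'll need to initialize it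
--         if cve not in weekday_metrics: # this means we've haven't initialized this cve yet so we'll need to
--             # initialize cve with an empty dictionary for the weekday metrics
--             weekday_metrics[cve] = {}
--
--         # Check to see if we've already added this weekday before, otherwise we'll need to initialize it
--         if weekday in weekday_metrics[cve]: # this means we've already initialized this weekday, so we can just update it
--             # += 1 is a short way to say add one to the previous number
--             weekday_metrics[cve][weekday] += 1
--         else: # initialize metrics for the new weekday
--             weekday_metrics[cve][weekday] = 1
--
--     return weekday_metrics
-- ===== SOURCE B (Python) =====
-- def get_weekday_metrics_for_by_cve(tweet_data_list):
--     # Pass 1: flat tally keyed by the (cve, weekday) pair.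
--     counts = {}
--     for tweet_data in tweet_data_list:
--         key = (tweet_data['cve'], tweet_data['date_weekday'])
--         counts[key] = counts.get(key, 0) + 1
--     # Pass 2: reshape the flat tally into the nested dict.
--     weekday_metrics = {}
--     for (cve, weekday), n in counts.items():
--         weekday_metrics.setdefault(cve, {})[weekday] = n
--     return weekday_metrics
-- ===== Notes on version B (the rewrite author's own statement) =====
-- stated objective: alternative
-- what changed: B replaces A's single nested-dict-update loop by two separate passes: a flat Counter-style tally keyed by the (cve, weekday) tuple, then a reshape pass that turns the flat tally into the nested dict.
import Mathlib
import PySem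

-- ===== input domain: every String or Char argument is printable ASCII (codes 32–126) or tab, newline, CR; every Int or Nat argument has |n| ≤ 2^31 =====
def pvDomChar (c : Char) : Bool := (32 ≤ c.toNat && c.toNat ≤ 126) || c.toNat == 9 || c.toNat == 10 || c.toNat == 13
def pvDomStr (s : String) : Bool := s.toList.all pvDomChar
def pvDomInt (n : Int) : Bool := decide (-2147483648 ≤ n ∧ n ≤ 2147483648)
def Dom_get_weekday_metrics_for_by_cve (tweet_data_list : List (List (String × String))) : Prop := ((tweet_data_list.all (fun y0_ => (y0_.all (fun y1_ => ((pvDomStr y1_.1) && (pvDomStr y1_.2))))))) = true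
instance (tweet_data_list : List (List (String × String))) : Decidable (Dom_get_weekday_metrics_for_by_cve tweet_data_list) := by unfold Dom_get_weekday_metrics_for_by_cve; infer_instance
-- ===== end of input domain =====

-- B counts tweets into a flat (cve, weekday)-keyed tally first and reshapes it into the nested dict
-- in a second pass (alternative decomposition; same asymptotic cost as A).


-- td[k]: Python dict lookup on the association list (first match)
def pvLookup (td : List (String × String)) (k : String) : Option String :=
  (td.find? (fun p => p.1 == k)).map (·.2)

-- ===== PORT A =====
-- A's loop body once cve and weekday are in hand (the two ifs of A, in order)
def pvStepA1 (wm : PySem.Dict String (PySem.Dict String Int)) (cve weekday : String) :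
    PySem.Dict String (PySem.Dict String Int) :=
  let wm1 := if wm.contains cve then wm else wm.insert cve PySem.Dict.empty
  let inner := wm1.getD cve PySem.Dict.empty
  if inner.contains weekday then
    wm1.insert cve (inner.insert weekday (inner.getD weekday 0 + 1))
  else
    wm1.insert cve (inner.insert weekday 1)

-- one iteration of A's loop (the `_, _` arm is the KeyError case, excluded by Pre_)
def pvStepA (wm : PySem.Dict String (PySem.Dict String Int)) (td : List (String × String)) :
    PySem.Dict String (PySem.Dict String Int) :=
  match pvLookup td "cve", pvLookup td "date_weekday" with
  | some cve, some weekday => pvStepA1 wm cve weekday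
  | _, _ => wm

def get_weekday_metrics_for_by_cve (tweet_data_list : List (List (String × String))) : List (String × List (String × Int)) :=
  ((tweet_data_list.foldl pvStepA PySem.Dict.empty).items).map (fun p => (p.1, p.2.items))

-- ===== PORT B =====
-- pass 1: one iteration of the flat tally loop (`_, _` = KeyError, excluded by Pre_)
def pvStepCount1 (counts : PySem.Dict (String × String) Int) (cve weekday : String) :
    PySem.Dict (String × String) Int :=
  counts.insert (cve, weekday) (counts.getD (cve, weekday) 0 + 1)

def pvStepCount (counts : PySem.Dict (String × String) Int) (td : List (String × String)) :
    PySem.Dict (String × String) Int :=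
  match pvLookup td "cve", pvLookup td "date_weekday" with
  | some cve, some weekday => pvStepCount1 counts cve weekday
  | _, _ => counts

-- pass 2: one iteration of the reshape loop: weekday_metrics.setdefault(cve, {})[weekday] = n
def pvStep2 (res : PySem.Dict String (PySem.Dict String Int)) (p : (String × String) × Int) :
    PySem.Dict String (PySem.Dict String Int) :=
  let res1 := res.setdefault p.1.1 PySem.Dict.empty
  res1.insert p.1.1 ((res1.getD p.1.1 PySem.Dict.empty).insert p.1.2 p.2)

def get_weekday_metrics_for_by_cve_alt (tweet_data_list : List (List (String × String))) : List (String × List (String × Int)) :=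
  let counts := tweet_data_list.foldl pvStepCount PySem.Dict.empty
  let weekday_metrics := counts.items.foldl pvStep2 PySem.Dict.empty
  weekday_metrics.items.map (fun p => (p.1, p.2.items))

-- ===== PRECONDITION & SPEC =====
-- Pre_ excludes exactly the inputs where Python A raises KeyError: some tweet dict lacks 'cve' or 'date_weekday'.
def Pre_get_weekday_metrics_for_by_cve (tweet_data_list : List (List (String × String))) : Prop :=
  (tweet_data_list.all (fun td => td.any (fun p => p.1 == "cve") && td.any (fun p => p.1 == "date_weekday"))) = true
instance (tweet_data_list : List (List (String × String))) : Decidable (Pre_get_weekday_metrics_for_by_cve tweet_data_list) := by unfold Pre_get_weekday_metrics_for_by_cve; infer_instance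

def pvWitness_get_weekday_metrics_for_by_cve : (List (List (String × String))) :=
  [[("cve", "CVE-2021-1"), ("date_weekday", "Monday")], [("cve", "CVE-2021-1"), ("date_weekday", "Monday")]]

def Spec_get_weekday_metrics_for_by_cve (tweet_data_list : List (List (String × String))) (out : List (String × List (String × Int))) : Prop := out = get_weekday_metrics_for_by_cve_alt tweet_data_list
instance (tweet_data_list : List (List (String × String))) (out : List (String × List (String × Int))) : Decidable (Spec_get_weekday_metrics_for_by_cve tweet_data_list out) := by unfold Spec_get_weekday_metrics_for_by_cve; infer_instance

-- ===== CLAIM (what is proved, stated in full; the proofs are below) =====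
def Claim_equal_get_weekday_metrics_for_by_cve : Prop := ∀ (tweet_data_list : List (List (String × String))), Dom_get_weekday_metrics_for_by_cve tweet_data_list → Pre_get_weekday_metrics_for_by_cve tweet_data_list → Spec_get_weekday_metrics_for_by_cve tweet_data_list (get_weekday_metrics_for_by_cve tweet_data_list)

-- ===== LEMMAS AND PROOFS =====

-- reshape of a flat-tally items list (what B's second pass computes)
def pvReshape (counts : PySem.Dict (String × String) Int) : PySem.Dict String (PySem.Dict String Int) :=
  counts.items.foldl pvStep2 PySem.Dict.empty

-- bump: overwrite the inner value at (c, w) with n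
def pvBump (d : PySem.Dict String (PySem.Dict String Int)) (c w : String) (n : Int) :
    PySem.Dict String (PySem.Dict String Int) :=
  d.insert c ((d.getD c PySem.Dict.empty).insert w n)

-- two inserts at distinct keys commute as DICTS (items order included) when the first key is already present
theorem pv_insert_comm {κ ν : Type} [BEq κ] [LawfulBEq κ] (d : PySem.Dict κ ν) (k k' : κ) (v v' : ν)
    (hc : d.contains k = true) (hne : k' ≠ k) :
    (d.insert k' v').insert k v = (d.insert k v).insert k' v' := by
  apply PySem.Dict.ext
  have hck' : (d.insert k' v').contains k = true := by
    rw [PySem.Dict.contains_insert]; simp [hc]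
  have hck2 : (d.insert k v).contains k' = d.contains k' := by
    rw [PySem.Dict.contains_insert]; simp [hne]
  by_cases h' : d.contains k' = true
  · rw [PySem.Dict.items_insert_of_contains _ _ hck', PySem.Dict.items_insert_of_contains _ _ h',
        PySem.Dict.items_insert_of_contains _ _ (hck2.trans h'), PySem.Dict.items_insert_of_contains _ _ hc]
    simp only [List.map_map]
    apply List.map_congr_left
    intro p _
    simp only [Function.comp]
    by_cases h1 : p.1 = k' <;> by_cases h2 : p.1 = k <;>
      simp_all [Ne.symm hne]
  · have h'2 : d.contains k' = false := by simpa using h'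
    rw [PySem.Dict.items_insert_of_contains _ _ hck', PySem.Dict.items_insert_of_not_contains _ _ h'2,
        PySem.Dict.items_insert_of_not_contains _ _ (hck2.trans h'2), PySem.Dict.items_insert_of_contains _ _ hc]
    simp [hne]

theorem pv_setdefault_getD_same (d : PySem.Dict String (PySem.Dict String Int)) (c : String) :
    (d.setdefault c PySem.Dict.empty).getD c PySem.Dict.empty = d.getD c PySem.Dict.empty := by
  by_cases h : d.contains c = true
  · rw [PySem.Dict.setdefault_of_contains _ _ h]
  · have h2 : d.contains c = false := by simpa using h
    rw [PySem.Dict.setdefault_of_not_contains _ _ h2, PySem.Dict.getD_insert_self,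
        PySem.Dict.getD_of_not_contains _ _ h2]

theorem pv_setdefault_getD_ne (d : PySem.Dict String (PySem.Dict String Int)) (c c' : String)
    (v d0 : PySem.Dict String Int) (h : c ≠ c') :
    (d.setdefault c' v).getD c d0 = d.getD c d0 := by
  by_cases hq : d.contains c' = true
  · rw [PySem.Dict.setdefault_of_contains _ _ hq]
  · have hq2 : d.contains c' = false := by simpa using hq
    rw [PySem.Dict.setdefault_of_not_contains _ _ hq2, PySem.Dict.getD_insert_of_ne _ _ _ h]

theorem pv_step2_getD_inner (d : PySem.Dict String (PySem.Dict String Int))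
    (q : (String × String) × Int) (c : String) :
    (pvStep2 d q).getD c PySem.Dict.empty =
      if q.1.1 = c then (d.getD c PySem.Dict.empty).insert q.1.2 q.2
      else d.getD c PySem.Dict.empty := by
  obtain ⟨⟨c', w'⟩, m⟩ := q
  simp only [pvStep2]
  by_cases hc' : c' = c
  · subst hc'
    simp [PySem.Dict.getD_insert_self, pv_setdefault_getD_same]
  · simp only [hc', if_false]
    rw [PySem.Dict.getD_insert_of_ne _ _ _ (Ne.symm hc'), pv_setdefault_getD_ne _ _ _ _ _ (Ne.symm hc')]

theorem pv_step2_contains_outer (d : PySem.Dict String (PySem.Dict String Int))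
    (q : (String × String) × Int) (c : String) :
    (pvStep2 d q).contains c = (q.1.1 == c || d.contains c) := by
  obtain ⟨⟨c', w'⟩, m⟩ := q
  simp only [pvStep2]
  rw [PySem.Dict.contains_insert]
  have hsd : (d.setdefault c' PySem.Dict.empty).contains c = (c == c' || d.contains c) := by
    by_cases hq : d.contains c' = true
    · rw [PySem.Dict.setdefault_of_contains _ _ hq]
      by_cases h : c = c'
      · subst h; simp [hq]
      · simp [h]
    · have hq2 : d.contains c' = false := by simpa using hq
      rw [PySem.Dict.setdefault_of_not_contains _ _ hq2, PySem.Dict.contains_insert]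
  rw [hsd]
  by_cases h : c = c'
  · subst h; simp
  · rw [beq_eq_false_iff_ne.mpr h, beq_eq_false_iff_ne.mpr (Ne.symm h)]
    simp

theorem pv_step2_bump_comm (d : PySem.Dict String (PySem.Dict String Int)) (c w : String) (n : Int)
    (q : (String × String) × Int) (hq : q.1 ≠ (c, w))
    (hc : d.contains c = true) (hw : (d.getD c PySem.Dict.empty).contains w = true) :
    pvStep2 (pvBump d c w n) q = pvBump (pvStep2 d q) c w n := by
  obtain ⟨⟨c', w'⟩, m⟩ := q
  simp only [pvStep2, pvBump] at *
  by_cases hc' : c' = c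
  · subst hc'
    have hww : w' ≠ w := by simpa using hq
    rw [PySem.Dict.setdefault_of_contains _ _ (PySem.Dict.contains_insert_self _ _ _),
        PySem.Dict.setdefault_of_contains _ _ hc]
    simp only [PySem.Dict.getD_insert_self, PySem.Dict.insert_insert_self]
    rw [pv_insert_comm _ _ _ _ _ hw hww]
  · by_cases hq' : d.contains c' = true
    · have h1 : (d.insert c ((d.getD c PySem.Dict.empty).insert w n)).contains c' = true := by
        rw [PySem.Dict.contains_insert]; simp [hq']
      rw [PySem.Dict.setdefault_of_contains _ _ h1, PySem.Dict.setdefault_of_contains _ _ hq']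
      rw [PySem.Dict.getD_insert_of_ne _ _ _ hc', PySem.Dict.getD_insert_of_ne _ _ _ (Ne.symm hc')]
      exact (pv_insert_comm d c c' _ _ hc hc').symm
    · have hq2 : d.contains c' = false := by simpa using hq'
      have h1 : (d.insert c ((d.getD c PySem.Dict.empty).insert w n)).contains c' = false := by
        rw [PySem.Dict.contains_insert]; simp [hq2, hc']
      rw [PySem.Dict.setdefault_of_not_contains _ _ h1, PySem.Dict.setdefault_of_not_contains _ _ hq2]
      simp only [PySem.Dict.getD_insert_self, PySem.Dict.insert_insert_self]
      rw [PySem.Dict.getD_insert_of_ne _ _ _ (Ne.symm hc')]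
      exact (pv_insert_comm _ c c' _ _ hc hc').symm

theorem pv_fold_bump_comm (l : List ((String × String) × Int)) (d : PySem.Dict String (PySem.Dict String Int))
    (c w : String) (n : Int) (hl : ∀ q ∈ l, q.1 ≠ (c, w))
    (hc : d.contains c = true) (hw : (d.getD c PySem.Dict.empty).contains w = true) :
    l.foldl pvStep2 (pvBump d c w n) = pvBump (l.foldl pvStep2 d) c w n := by
  induction l generalizing d with
  | nil => rfl
  | cons q t ih =>
    simp only [List.foldl_cons]
    rw [pv_step2_bump_comm d c w n q (hl q (List.mem_cons_self)) hc hw]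
    apply ih _ (fun p hp => hl p (List.mem_cons_of_mem _ hp))
    · rw [pv_step2_contains_outer]; simp [hc]
    · rw [pv_step2_getD_inner]
      by_cases h : q.1.1 = c
      · rw [if_pos h, PySem.Dict.contains_insert]; simp [hw]
      · rw [if_neg h]; exact hw

theorem pv_fold_overwrite (l : List ((String × String) × Int)) (d : PySem.Dict String (PySem.Dict String Int))
    (c w : String) (n : Int) (hn : (l.map (·.1)).Nodup) (hm : (c, w) ∈ l.map (·.1)) :
    (l.map (fun p => if p.1 == (c, w) then ((c, w), n) else p)).foldl pvStep2 d
      = pvBump (l.foldl pvStep2 d) c w n := by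
  induction l generalizing d with
  | nil => simp at hm
  | cons q t ih =>
    obtain ⟨⟨c', w'⟩, m⟩ := q
    simp only [List.map_cons, List.nodup_cons, List.mem_map, List.mem_cons] at hn hm
    by_cases hq : (c', w') = (c, w)
    · rw [Prod.mk.injEq] at hq
      obtain ⟨h1, h2⟩ := hq; subst h1; subst h2
      have hnt : ∀ p ∈ t, p.1 ≠ (c', w') := by
        intro p hp hpe
        exact hn.1 ⟨p, hp, hpe⟩
      have htid : t.map (fun p => if p.1 == (c', w') then ((c', w'), n) else p) = t := by
        conv_rhs => rw [← List.map_id t]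
        exact List.map_congr_left (fun p hp => by simp [hnt p hp])
      simp only [List.map_cons, List.foldl_cons, htid, beq_self_eq_true, if_true]
      have hstep : pvStep2 d ((c', w'), n) = pvBump (pvStep2 d ((c', w'), m)) c' w' n := by
        simp only [pvStep2, pvBump, PySem.Dict.getD_insert_self, PySem.Dict.insert_insert_self]
      rw [hstep]
      exact pv_fold_bump_comm t _ c' w' n hnt
        (by simp only [pvStep2]; exact PySem.Dict.contains_insert_self _ _ _)
        (by simp only [pvStep2, PySem.Dict.getD_insert_self]; exact PySem.Dict.contains_insert_self _ _ _)
    · rcases hm with he | ⟨p, hp, hpe⟩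
      · exact absurd he.symm hq
      · simp only [List.map_cons, List.foldl_cons, if_neg (by simpa using hq :
          ¬ ((((c', w') : String × String), m).1 == (c, w)) = true)]
        exact ih _ hn.2 (List.mem_map.mpr ⟨p, hp, hpe⟩)

-- inner contains after the reshape fold
theorem pv_fold_contains_inner (l : List ((String × String) × Int)) (d : PySem.Dict String (PySem.Dict String Int)) (c w : String) :
    ((l.foldl pvStep2 d).getD c PySem.Dict.empty).contains w
      = ((d.getD c PySem.Dict.empty).contains w || l.any (fun p => p.1 == (c, w))) := by
  induction l generalizing d with
  | nil => simp
  | cons q t ih =>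
    obtain ⟨⟨c', w'⟩, m⟩ := q
    rw [List.foldl_cons, ih, List.any_cons, pv_step2_getD_inner]
    by_cases h : c' = c
    · subst h
      rw [if_pos rfl, PySem.Dict.contains_insert]
      by_cases hww : w = w'
      · subst hww; simp
      · have h1 : (w == w') = false := beq_eq_false_iff_ne.mpr hww
        have h2 : ((((c', w') : String × String)) == (c', w)) = false := by
          rw [beq_eq_false_iff_ne]
          exact fun he => hww (congrArg Prod.snd he).symm
        rw [h1, h2]
        simp
    · rw [if_neg h]
      have h2 : ((((c', w') : String × String)) == (c, w)) = false := by
        rw [beq_eq_false_iff_ne]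
        exact fun he => h (congrArg Prod.fst he)
      rw [h2]
      simp

-- outer contains after the reshape fold
theorem pv_fold_contains_outer (l : List ((String × String) × Int)) (d : PySem.Dict String (PySem.Dict String Int)) (c : String) :
    (l.foldl pvStep2 d).contains c = (d.contains c || l.any (fun p => p.1.1 == c)) := by
  induction l generalizing d with
  | nil => simp
  | cons q t ih =>
    rw [List.foldl_cons, ih, List.any_cons, pv_step2_contains_outer]
    simp [Bool.or_assoc, Bool.or_left_comm]

-- inner value untouched by a fold over other keys
theorem pv_fold_value_unchanged (l : List ((String × String) × Int)) (d : PySem.Dict String (PySem.Dict String Int))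
    (c w : String) (hl : ∀ p ∈ l, p.1 ≠ (c, w)) :
    ((l.foldl pvStep2 d).getD c PySem.Dict.empty).getD w 0 = ((d.getD c PySem.Dict.empty)).getD w 0 := by
  induction l generalizing d with
  | nil => rfl
  | cons q t ih =>
    rw [List.foldl_cons, ih _ (fun p hp => hl p (List.mem_cons_of_mem _ hp)), pv_step2_getD_inner]
    by_cases h : q.1.1 = c
    · rw [if_pos h]
      have hww : q.1.2 ≠ w := by
        intro he
        exact hl q List.mem_cons_self (by rw [← h, ← he])
      rw [PySem.Dict.getD_insert_of_ne _ _ _ (Ne.symm hww)]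
    · rw [if_neg h]

-- inner value after the reshape fold, for a key present once
theorem pv_fold_value (l : List ((String × String) × Int)) (d : PySem.Dict String (PySem.Dict String Int))
    (c w : String) (m : Int) (hn : (l.map (·.1)).Nodup) (hm : ((c, w), m) ∈ l) :
    ((l.foldl pvStep2 d).getD c PySem.Dict.empty).getD w 0 = m := by
  induction l generalizing d with
  | nil => simp at hm
  | cons q t ih =>
    simp only [List.map_cons, List.nodup_cons, List.mem_map] at hn
    rcases List.mem_cons.mp hm with hq | hq
    · subst hq
      rw [List.foldl_cons, pv_fold_value_unchanged t _ c w
            (fun p hp hpe => hn.1 ⟨p, hp, hpe⟩)]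
      simp [pvStep2, PySem.Dict.getD_insert_self]
    · exact ih _ hn.2 hq

theorem pv_step_sim (counts : PySem.Dict (String × String) Int) (td : List (String × String))
    (hn : counts.keys.Nodup) :
    pvStepA (pvReshape counts) td = pvReshape (pvStepCount counts td) := by
  unfold pvStepA pvStepCount
  cases hcv : pvLookup td "cve" with
  | none => cases pvLookup td "date_weekday" <;> rfl
  | some c =>
  cases hwd : pvLookup td "date_weekday" with
  | none => rfl
  | some w =>
  show pvStepA1 (pvReshape counts) c w = pvReshape (pvStepCount1 counts c w)
  have hkeys : counts.keys = counts.items.map (·.1) := by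
    simp only [PySem.Dict.keys]
  by_cases hcw : counts.contains (c, w) = true
  · -- the (c, w) key already exists: overwrite in place
    obtain ⟨m, hmem⟩ : ∃ m, ((c, w), m) ∈ counts.items := by
      rcases List.mem_map.mp (hkeys ▸ (PySem.Dict.contains_iff_mem_keys _ _).mp hcw) with ⟨p, hp, hpe⟩
      exact ⟨p.2, by rwa [show ((c, w), p.2) = p from Prod.ext hpe.symm rfl]⟩
    have hget : counts.getD (c, w) 0 = m := PySem.Dict.getD_of_mem_items _ hmem hn 0
    have hany : counts.items.any (fun p => p.1 == (c, w)) = true := by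
      simp only [List.any_eq_true]
      exact ⟨_, hmem, by simp⟩
    have hnits : (counts.items.map (·.1)).Nodup := by rw [← hkeys]; exact hn
    have hmits : (c, w) ∈ counts.items.map (·.1) := by
      rw [← hkeys]; exact (PySem.Dict.contains_iff_mem_keys _ _).mp hcw
    have hwc : (pvReshape counts).contains c = true := by
      rw [pvReshape, pv_fold_contains_outer]
      have h1 : counts.items.any (fun p => p.1.1 == c) = true :=
        List.any_eq_true.mpr ⟨_, hmem, by simp⟩
      simp [h1]
    have hww : ((pvReshape counts).getD c PySem.Dict.empty).contains w = true := by
      rw [pvReshape, pv_fold_contains_inner]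
      simp [hany]
    have hval : ((pvReshape counts).getD c PySem.Dict.empty).getD w 0 = m :=
      pv_fold_value _ _ _ _ _ hnits hmem
    have hA : pvStepA1 (pvReshape counts) c w = pvBump (pvReshape counts) c w (m + 1) := by
      simp only [pvStepA1, pvBump, hwc, if_true, hww, hval]
    rw [hA, pvStepCount1, hget, pvReshape, pvReshape, PySem.Dict.items_insert_of_contains _ _ hcw]
    exact (pv_fold_overwrite _ _ _ _ _ hnits hmits).symm
  · -- fresh (c, w) key: append
    have hcw2 : counts.contains (c, w) = false := by simpa using hcw
    have hany : counts.items.any (fun p => p.1 == (c, w)) = false := by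
      rw [← Bool.not_eq_true]
      intro hcon
      rcases List.any_eq_true.mp hcon with ⟨p, hp, hpe⟩
      have hc3 : counts.contains (c, w) = true := by
        rw [PySem.Dict.contains_iff_mem_keys, hkeys]
        exact List.mem_map.mpr ⟨p, hp, by simpa using hpe⟩
      rw [hcw2] at hc3
      exact Bool.false_ne_true hc3
    have hget : counts.getD (c, w) 0 = 0 := PySem.Dict.getD_of_not_contains _ _ hcw2
    have hwfalse : ((pvReshape counts).getD c PySem.Dict.empty).contains w = false := by
      rw [pvReshape, pv_fold_contains_inner]
      simp [hany]
    have hA : pvStepA1 (pvReshape counts) c w = pvStep2 (pvReshape counts) ((c, w), 1) := by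
      simp only [pvStepA1, pvStep2]
      by_cases hwc : (pvReshape counts).contains c = true
      · rw [if_pos hwc, PySem.Dict.setdefault_of_contains _ _ hwc, if_neg (by simp [hwfalse])]
      · have hwc2 : (pvReshape counts).contains c = false := by simpa using hwc
        rw [if_neg hwc, PySem.Dict.setdefault_of_not_contains _ _ hwc2,
            if_neg (by simp [PySem.Dict.getD_insert_self])]
    rw [hA, pvStepCount1, hget, pvReshape, pvReshape,
        PySem.Dict.items_insert_of_not_contains _ _ hcw2, List.foldl_append,
        List.foldl_cons, List.foldl_nil]
    norm_num

theorem pv_main (xs : List (List (String × String))) (counts : PySem.Dict (String × String) Int)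
    (hn : counts.keys.Nodup) :
    xs.foldl pvStepA (pvReshape counts) = pvReshape (xs.foldl pvStepCount counts) := by
  induction xs generalizing counts with
  | nil => rfl
  | cons td xs ih =>
    simp only [List.foldl_cons, pv_step_sim counts td hn]
    apply ih
    unfold pvStepCount
    cases pvLookup td "cve" <;> cases pvLookup td "date_weekday" <;>
      first
        | exact hn
        | (simp only [pvStepCount1]; exact PySem.Dict.nodup_keys_insert _ _ _ hn)

-- ===== VERDICT (by name: the statement is the Claim_ definition above) =====
theorem get_weekday_metrics_for_by_cve_spec : Claim_equal_get_weekday_metrics_for_by_cve := by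
  intro xs _ _
  unfold Spec_get_weekday_metrics_for_by_cve get_weekday_metrics_for_by_cve get_weekday_metrics_for_by_cve_alt
  have h := pv_main xs PySem.Dict.empty (by simp [PySem.Dict.keys_empty])
  simp only [pvReshape, show (PySem.Dict.empty : PySem.Dict (String × String) Int).items = [] from rfl, List.foldl_nil] at h
  rw [h]
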